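-- pv_equiv track=rewrite | github.com/internalforces/codingchallenges | 백준/Silver/21921. 블로그/블로그.py | max_visitors
-- ===== SOURCE A (Python) =====
-- def max_visitors(N, X, visitors):
--     current_sum = sum(visitors[:X])
--     max_sum = current_sum
--     max_count = 1
--
--     for i in range(X, N):
--         current_sum += visitors[i] - visitors[i - X]
--         if current_sum > max_sum:
--             max_sum = current_sum
--             max_count = 1
--         elif current_sum == max_sum:
--             max_count += 1
--
--     if max_sum == 0:
--         return "SAD"
--     else:
--         return f"{max_sum}\n{max_count}"
-- ===== SOURCE B (Python) =====
-- def max_visitors(N, X, visitors):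
--     # prefix sums: P[k] = visitors[0] + ... + visitors[k-1]
--     P = [0]
--     for v in visitors:
--         P.append(P[-1] + v)
--     max_sum = sum(visitors[:X])
--     max_count = 1
--     for i in range(1, N - X + 1):
--         s = P[i + X] - P[i]
--         if s > max_sum:
--             max_sum = s
--             max_count = 1
--         elif s == max_sum:
--             max_count += 1
--     if max_sum == 0:
--         return "SAD"
--     else:
--         return f"{max_sum}\n{max_count}"
-- ===== Notes on version B (the rewrite author's own statement) =====
-- stated objective: alternative
-- what changed: B builds an explicit prefix-sum table once and computes each later window sum by random access P[i+X]-P[i], replacing A's fused add/remove running-sum update in the sliding loop.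
-- outside the precondition, e.g. on max_visitors(1, -1, [1, 2]): A returns '2\n1', B returns '1\n1'
import Mathlib
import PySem

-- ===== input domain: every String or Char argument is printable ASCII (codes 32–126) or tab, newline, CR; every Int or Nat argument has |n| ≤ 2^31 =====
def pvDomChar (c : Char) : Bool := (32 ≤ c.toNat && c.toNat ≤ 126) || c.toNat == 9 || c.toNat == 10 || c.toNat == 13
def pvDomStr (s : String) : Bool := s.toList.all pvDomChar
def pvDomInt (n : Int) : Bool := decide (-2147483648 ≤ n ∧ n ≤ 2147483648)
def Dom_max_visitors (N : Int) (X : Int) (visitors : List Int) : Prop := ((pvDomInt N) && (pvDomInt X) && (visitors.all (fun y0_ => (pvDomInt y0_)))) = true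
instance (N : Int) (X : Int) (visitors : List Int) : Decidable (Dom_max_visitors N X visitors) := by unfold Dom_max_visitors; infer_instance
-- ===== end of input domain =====

-- B replaces A's fused add/remove running window sum by an explicit prefix-sum table with
-- random-access window sums (alternative decomposition, same O(N) cost).


-- ===== PORT A =====
def max_visitors (N : Int) (X : Int) (visitors : List Int) : String :=
  let current_sum := (PySem.List.slice visitors none (some X)).sum
  let st := (PySem.List.pyRange X N 1).foldl
    (fun (st : Int × Int × Int) i =>
      let cur := st.1 + (PySem.List.pyGetD visitors i 0 - PySem.List.pyGetD visitors (i - X) 0)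
      if cur > st.2.1 then (cur, cur, 1)
      else if cur = st.2.1 then (cur, st.2.1, st.2.2 + 1)
      else (cur, st.2.1, st.2.2))
    (current_sum, current_sum, 1)
  if st.2.1 = 0 then "SAD"
  else PySem.Int.toStr st.2.1 ++ "\n" ++ PySem.Int.toStr st.2.2

-- ===== PORT B =====
def max_visitors_alt (N : Int) (X : Int) (visitors : List Int) : String :=
  let P := visitors.foldl (fun P v => P ++ [PySem.List.pyGetD P (-1) 0 + v]) [(0 : Int)]
  let init := (PySem.List.slice visitors none (some X)).sum
  let st := (PySem.List.pyRange 1 (N - X + 1) 1).foldl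
    (fun (st : Int × Int) i =>
      let s := PySem.List.pyGetD P (i + X) 0 - PySem.List.pyGetD P i 0
      if s > st.1 then (s, 1)
      else if s = st.1 then (st.1, st.2 + 1)
      else st)
    (init, 1)
  if st.1 = 0 then "SAD"
  else PySem.Int.toStr st.1 ++ "\n" ++ PySem.Int.toStr st.2

-- ===== PRECONDITION & SPEC =====
-- Pre_ admits every input whose sliding loop is empty (N ≤ X: both programs just report the first
-- clamped window) and every proper sliding run with 0 ≤ X and N ≤ len(visitors); it excludes only
-- X < 0 < N - X (A's value comes from accidental negative-index wraparound, B reads the prefix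
-- table differently) and N > len(visitors) with X < N (A raises IndexError in the loop).
def Pre_max_visitors (N : Int) (X : Int) (visitors : List Int) : Prop :=
  N ≤ X ∨ (0 ≤ X ∧ N ≤ visitors.length)
instance (N : Int) (X : Int) (visitors : List Int) : Decidable (Pre_max_visitors N X visitors) := by
  unfold Pre_max_visitors; infer_instance
def pvWitness_max_visitors : Int × Int × List Int := (5, 2, [1, 0, 2, 0, 2])

def Spec_max_visitors (N : Int) (X : Int) (visitors : List Int) (out : String) : Prop :=
  out = max_visitors_alt N X visitors
instance (N : Int) (X : Int) (visitors : List Int) (out : String) : Decidable (Spec_max_visitors N X visitors out) := by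
  unfold Spec_max_visitors; infer_instance

-- ===== CLAIM (what is proved, stated in full; the proofs are below) =====
def Claim_equal_max_visitors : Prop := ∀ (N : Int) (X : Int) (visitors : List Int), Dom_max_visitors N X visitors → Pre_max_visitors N X visitors → Spec_max_visitors N X visitors (max_visitors N X visitors)

-- ===== LEMMAS AND PROOFS =====

/-- window sum of length `x` starting at `j` -/
def pvW (x : Nat) (vs : List Int) (j : Nat) : Int := ((vs.drop j).take x).sum

/-- the shared max/count update -/
def pvStep (st : Int × Int) (s : Int) : Int × Int :=
  if s > st.1 then (s, 1) else if s = st.1 then (st.1, st.2 + 1) else st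

/-- prefix sums continuing from running total `s` -/
def pvPref (s : Int) : List Int → List Int
  | [] => []
  | v :: vs => (s + v) :: pvPref (s + v) vs

theorem pvGetD_last {Q : List Int} {a : Int} :
    PySem.List.pyGetD (Q ++ [a]) (-1) 0 = a := by
  simp [PySem.List.pyGetD, PySem.List.pyGet?, PySem.List.pyIdx?]

theorem pvFoldl_pref (vs : List Int) : ∀ (Q : List Int) (a : Int),
    vs.foldl (fun P v => P ++ [PySem.List.pyGetD P (-1) 0 + v]) (Q ++ [a])
      = (Q ++ [a]) ++ pvPref a vs := by
  induction vs with
  | nil => intro Q a; simp [pvPref]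
  | cons v vs ih =>
    intro Q a
    simp only [List.foldl_cons, pvGetD_last, pvPref]
    rw [ih (Q ++ [a]) (a + v)]
    simp

theorem pvPref_getD (vs : List Int) : ∀ (s : Int) (k : Nat), k < vs.length →
    (pvPref s vs).getD k 0 = s + (vs.take (k + 1)).sum := by
  induction vs with
  | nil => intro s k h; simp at h
  | cons v vs ih =>
    intro s k h
    cases k with
    | zero => simp [pvPref]
    | succ k =>
      simp only [pvPref, List.getD_cons_succ, List.take_succ_cons, List.sum_cons]
      rw [ih (s + v) k (by simpa using h)]
      ring

/-- the prefix table reads back partial sums -/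
theorem pvP_getD (vs : List Int) (j : Nat) (hj : j ≤ vs.length) :
    (0 :: pvPref 0 vs).getD j 0 = (vs.take j).sum := by
  cases j with
  | zero => simp
  | succ j =>
    simp only [List.getD_cons_succ]
    rw [pvPref_getD vs 0 j (by omega)]
    simp

theorem pvW_zero (x : Nat) (vs : List Int) : pvW x vs 0 = (vs.take x).sum := by
  simp [pvW]

/-- window sum as prefix-sum difference (unconditional thanks to clamping `take`) -/
theorem pvW_diff (x : Nat) (vs : List Int) (j : Nat) :
    (vs.take (j + x)).sum - (vs.take j).sum = pvW x vs j := by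
  rw [List.take_add, List.sum_append, pvW]
  ring

/-- sliding update of the window sum -/
theorem pvW_succ (x : Nat) (vs : List Int) (j : Nat) (h : j + x < vs.length) :
    pvW x vs (j + 1) = pvW x vs j + vs.getD (j + x) 0 - vs.getD j 0 := by
  have hj : j < vs.length := by omega
  have h1 : vs.drop j = vs.getD j 0 :: vs.drop (j + 1) := by
    rw [List.getD_eq_getElem vs 0 hj]
    exact List.drop_eq_getElem_cons hj
  have h2 : (vs.drop j).take (x + 1) = (vs.drop j).take x ++ [vs.getD (j + x) 0] := by
    rw [List.take_add_one]
    congr 1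
    rw [List.getElem?_drop, List.getD_eq_getElem vs 0 h]
    simp
  have h3 : (vs.drop j).take (x + 1) = vs.getD j 0 :: (vs.drop (j + 1)).take x := by
    rw [h1, List.take_succ_cons]
  have hs := congrArg List.sum (h2.symm.trans h3)
  simp only [List.sum_append, List.sum_cons, List.sum_nil] at hs
  unfold pvW
  linarith

/-- A's loop: from state (cur = W 0, q) the fold over window-end indices tracks
    the running window sum and performs `pvStep` on the successive window sums. -/
theorem pvLoopA (x n : Nat) (vs : List Int) (hn : n ≤ vs.length) (hx : x ≤ n) :
    ∀ (m : Nat), m ≤ n - x → ∀ (q : Int × Int),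
    (List.range m).foldl
      (fun (st : Int × Int × Int) (k : Nat) =>
        let cur := st.1 + (PySem.List.pyGetD vs ((x : Int) + k) 0
                         - PySem.List.pyGetD vs (((x : Int) + k) - x) 0)
        if cur > st.2.1 then (cur, cur, 1)
        else if cur = st.2.1 then (cur, st.2.1, st.2.2 + 1)
        else (cur, st.2.1, st.2.2))
      (pvW x vs 0, q)
      = (pvW x vs m, (List.range m |>.map (fun k => pvW x vs (k + 1))).foldl pvStep q) := by
  intro m
  induction m with
  | zero => intro _ q; simp
  | succ m ih =>
    intro hm q
    rw [List.range_succ, List.foldl_append, List.map_append, List.foldl_append,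
        ih (by omega) q]
    have hc1 : ((x : Int) + m) = ((x + m : Nat) : Int) := by omega
    have hc2 : ((x : Int) + m) - x = ((m : Nat) : Int) := by omega
    have hcur : pvW x vs m + (PySem.List.pyGetD vs ((x : Int) + m) 0
        - PySem.List.pyGetD vs (((x : Int) + m) - x) 0) = pvW x vs (m + 1) := by
      rw [hc2, hc1, PySem.List.pyGetD_natCast, PySem.List.pyGetD_natCast]
      rw [pvW_succ x vs m (by omega)]
      rw [Nat.add_comm x m]
      ring
    simp only [List.foldl_cons, List.foldl_nil, List.map_cons, List.map_nil, hcur]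
    generalize List.foldl pvStep q (List.map (fun k => pvW x vs (k + 1)) (List.range m)) = F
    obtain ⟨mx, cnt⟩ := F
    simp only [pvStep]
    split_ifs <;> simp_all

theorem pvPref_length (vs : List Int) : ∀ s : Int, (pvPref s vs).length = vs.length := by
  induction vs with
  | nil => intro s; simp [pvPref]
  | cons v vs ih => intro s; simp [pvPref, ih]

/-- reading the prefix table at a natural index -/
theorem pvP_get (vs : List Int) (j : Nat) (hj : j ≤ vs.length) :
    PySem.List.pyGetD (0 :: pvPref 0 vs) ((j : Nat) : Int) 0 = (vs.take j).sum := by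
  rw [PySem.List.pyGetD_natCast]
  exact pvP_getD vs j (by simpa [pvPref] using pvPref_length vs 0 ▸ hj)

/-- B's loop: the fold over window-start indices performs `pvStep` on the successive
    window sums read off the prefix table. -/
theorem pvLoopB (x n : Nat) (vs : List Int) (hn : n ≤ vs.length) (hx : x ≤ n) :
    ∀ (m : Nat), m ≤ n - x → ∀ (q : Int × Int),
    (List.range m).foldl
      (fun (st : Int × Int) (k : Nat) =>
        let s := PySem.List.pyGetD (0 :: pvPref 0 vs) ((1 + (k : Int)) + (x : Int)) 0
               - PySem.List.pyGetD (0 :: pvPref 0 vs) (1 + (k : Int)) 0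
        if s > st.1 then (s, 1) else if s = st.1 then (st.1, st.2 + 1) else st) q
      = ((List.range m).map (fun k => pvW x vs (k + 1))).foldl pvStep q := by
  intro m
  induction m with
  | zero => intro _ q; simp
  | succ m ih =>
    intro hm q
    rw [List.range_succ, List.foldl_append, List.map_append, List.foldl_append,
        ih (by omega) q]
    have hc1 : (1 + (m : Int)) + (x : Int) = ((1 + m + x : Nat) : Int) := by omega
    have hc2 : 1 + (m : Int) = ((1 + m : Nat) : Int) := by omega
    have hs : PySem.List.pyGetD (0 :: pvPref 0 vs) ((1 + (m : Int)) + (x : Int)) 0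
            - PySem.List.pyGetD (0 :: pvPref 0 vs) (1 + (m : Int)) 0 = pvW x vs (m + 1) := by
      rw [hc1, hc2, pvP_get vs (1 + m + x) (by omega), pvP_get vs (1 + m) (by omega)]
      rw [show 1 + m + x = (m + 1) + x by omega, show 1 + m = m + 1 by omega]
      exact pvW_diff x vs (m + 1)
    simp only [List.foldl_cons, List.foldl_nil, List.map_cons, List.map_nil, hs, pvStep]

-- ===== VERDICT (by name: the statement is the Claim_ definition above) =====
theorem max_visitors_spec : Claim_equal_max_visitors := by
  intro N X vs _ hpre
  unfold Spec_max_visitors max_visitors max_visitors_alt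
  by_cases hcase : N ≤ X
  · -- both loops are empty
    have hr1 : PySem.List.pyRange X N 1 = [] :=
      PySem.List.pyRange_one_eq_nil hcase
    have hr2 : PySem.List.pyRange 1 (N - X + 1) 1 = [] :=
      PySem.List.pyRange_one_eq_nil (by omega)
    simp only [hr1, hr2, List.foldl_nil]
  · have hpre' : 0 ≤ X ∧ N ≤ (vs.length : Int) := by
      rcases hpre with h | h
      · omega
      · exact h
    obtain ⟨hX, hNl⟩ := hpre'
    obtain ⟨x, rfl⟩ := Int.eq_ofNat_of_zero_le hX
    obtain ⟨n, rfl⟩ := Int.eq_ofNat_of_zero_le (le_trans hX (le_of_lt (lt_of_not_ge hcase)))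
    have hx : x ≤ n := by omega
    have hn : n ≤ vs.length := by exact_mod_cast hNl
    have hP : vs.foldl (fun P v => P ++ [PySem.List.pyGetD P (-1) 0 + v]) [(0 : Int)]
        = 0 :: pvPref 0 vs := by simpa using pvFoldl_pref vs [] 0
    have e1 : ((n : Int) - (x : Int)).toNat = n - x := by omega
    have e2 : ((n : Int) - (x : Int) + 1 - 1).toNat = n - x := by omega
    have hA := pvLoopA x n vs hn hx (n - x) le_rfl (pvW x vs 0, 1)
    have hB := pvLoopB x n vs hn hx (n - x) le_rfl (pvW x vs 0, 1)
    simp only [hP, PySem.List.pyRange_one, e1, e2, List.foldl_map,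
      PySem.List.slice_to_natCast, ← pvW_zero x vs, hA, hB]
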